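-- pv_equiv track=rewrite | github.com/gregoryann/Python-Beginner-Examples | Advent-of-Code/2019/day3/day3/day3_solution.py | add_coords
-- ===== SOURCE A (Python) =====
-- def add_coords(path, direction, count):
--     for i in range(count):
--         last_coord = path[-1]
--         if direction == 'R':
--             path.append((last_coord[0] + 1, last_coord[1]))
--         elif direction == 'L':
--             path.append((last_coord[0] - 1, last_coord[1]))
--         elif direction == 'U':
--             path.append((last_coord[0], last_coord[1] + 1))
--         elif direction == 'D':
--             path.append((last_coord[0], last_coord[1] - 1))
--     return path
-- ===== SOURCE B (Python) =====
-- def add_coords(path, direction, count):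
--     if count > 0:
--         x, y = path[-1]
--         delta = {'R': (1, 0), 'L': (-1, 0), 'U': (0, 1), 'D': (0, -1)}
--         if direction in delta:
--             dx, dy = delta[direction]
--             path.extend((x + dx * i, y + dy * i) for i in range(1, count + 1))
--     return path
-- ===== Notes on version B (the rewrite author's own statement) =====
-- stated objective: simpler
-- what changed: B replaces A's per-step chaining off the freshly appended last element (re-reading path[-1] each iteration inside an if/elif ladder) by reading the anchor once and extending path in one bulk operation with closed-form offsets (x+dx*i, y+dy*i) from a direction->delta table.
import Mathlib
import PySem

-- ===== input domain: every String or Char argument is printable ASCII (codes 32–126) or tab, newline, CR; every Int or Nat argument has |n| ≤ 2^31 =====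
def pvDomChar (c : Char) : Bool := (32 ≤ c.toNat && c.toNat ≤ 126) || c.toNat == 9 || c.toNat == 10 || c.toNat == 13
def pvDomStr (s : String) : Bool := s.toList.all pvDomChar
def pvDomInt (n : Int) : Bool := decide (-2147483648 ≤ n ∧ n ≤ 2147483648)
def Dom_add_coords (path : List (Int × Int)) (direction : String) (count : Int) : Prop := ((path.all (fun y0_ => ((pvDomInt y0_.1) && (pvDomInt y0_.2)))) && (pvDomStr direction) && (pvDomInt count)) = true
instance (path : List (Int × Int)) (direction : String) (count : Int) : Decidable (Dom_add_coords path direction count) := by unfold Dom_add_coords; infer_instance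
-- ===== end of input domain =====

-- B reads the anchor once and extends with closed-form offsets from a delta table, instead of
-- A's per-step chaining off path[-1]; both Pythons mutate `path` in place — equivalence here is
-- about the returned value.

-- ===== PORT A =====
-- one iteration of A's for-body (path[-1] read inside the loop; `none` = IndexError, excluded by Pre_)
def add_coords_step (direction : String) (p : List (Int × Int)) : List (Int × Int) :=
  match PySem.List.pyGet? p (-1) with
  | none => p
  | some last =>
    if direction = "R" then p ++ [(last.1 + 1, last.2)]
    else if direction = "L" then p ++ [(last.1 - 1, last.2)]
    else if direction = "U" then p ++ [(last.1, last.2 + 1)]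
    else if direction = "D" then p ++ [(last.1, last.2 - 1)]
    else p

def add_coords (path : List (Int × Int)) (direction : String) (count : Int) : List (Int × Int) :=
  (PySem.List.pyRange 0 count 1).foldl (fun p _ => add_coords_step direction p) path

-- ===== PORT B =====
def add_coords_delta : PySem.Dict String (Int × Int) :=
  PySem.Dict.ofList [("R", (1, 0)), ("L", (-1, 0)), ("U", (0, 1)), ("D", (0, -1))]

def add_coords_alt (path : List (Int × Int)) (direction : String) (count : Int) : List (Int × Int) :=
  if 0 < count then
    match PySem.List.pyGet? path (-1) with
    | none => path   -- IndexError in Python, excluded by Pre_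
    | some (x, y) =>
      match PySem.Dict.get? add_coords_delta direction with
      | some (dx, dy) => path ++ (PySem.List.pyRange 1 (count + 1) 1).map (fun i => (x + dx * i, y + dy * i))
      | none => path
  else path

-- ===== PRECONDITION & SPEC =====
-- Pre_ excludes exactly the inputs where Python raises IndexError: empty path with count > 0.
def Pre_add_coords (path : List (Int × Int)) (direction : String) (count : Int) : Prop :=
  path ≠ [] ∨ count ≤ 0
instance (path : List (Int × Int)) (direction : String) (count : Int) : Decidable (Pre_add_coords path direction count) := by unfold Pre_add_coords; infer_instance

def pvWitness_add_coords : (List (Int × Int)) × String × Int := ([(0, 0)], "R", 3)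

def Spec_add_coords (path : List (Int × Int)) (direction : String) (count : Int) (out : List (Int × Int)) : Prop := out = add_coords_alt path direction count
instance (path : List (Int × Int)) (direction : String) (count : Int) (out : List (Int × Int)) : Decidable (Spec_add_coords path direction count out) := by unfold Spec_add_coords; infer_instance

-- ===== CLAIM (what is proved, stated in full; the proofs are below) =====
def Claim_equal_add_coords : Prop := ∀ (path : List (Int × Int)) (direction : String) (count : Int), Dom_add_coords path direction count → Pre_add_coords path direction count → Spec_add_coords path direction count (add_coords path direction count)

-- ===== LEMMAS AND PROOFS =====

theorem foldl_const_iterate {α β : Type} (f : α → α) (l : List β) (init : α) :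
    l.foldl (fun a _ => f a) init = f^[l.length] init := by
  induction l generalizing init with
  | nil => rfl
  | cons h t ih => simp [List.foldl_cons, ih, Function.iterate_succ_apply]

-- chaining n steps off the last element = the base plus closed-form offsets
theorem step_iterate (direction : String) (dx dy : Int)
    (hstep : ∀ (q : List (Int × Int)) (a b : Int),
      PySem.List.pyGet? q (-1) = some (a, b) → add_coords_step direction q = q ++ [(a + dx, b + dy)])
    (n : ℕ) (p : List (Int × Int)) (x y : Int)
    (h : PySem.List.pyGet? p (-1) = some (x, y)) :
    (add_coords_step direction)^[n] p
      = p ++ (List.range n).map (fun k : Nat => (x + dx * ((k : Int) + 1), y + dy * ((k : Int) + 1))) := by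
  induction n with
  | zero => simp
  | succ m ih =>
    rw [Function.iterate_succ_apply', ih]
    cases m with
    | zero =>
      simp only [List.range_zero, List.map_nil, List.append_nil]
      rw [hstep p x y h, show List.range (0 + 1) = [0] from rfl]
      norm_num
    | succ j =>
      conv_rhs => rw [List.range_succ]
      rw [List.range_succ]
      simp only [List.map_append, List.map_cons, List.map_nil, ← List.append_assoc]
      rw [hstep _ _ _ (PySem.List.pyGet?_neg_one_append_singleton _ _)]
      simp only [List.append_right_inj, List.cons.injEq, and_true, Prod.mk.injEq]
      constructor <;> push_cast <;> ring

theorem add_coords_len (count : Int) :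
    (PySem.List.pyRange 0 count 1).length = count.toNat := by
  rw [PySem.List.length_pyRange_one]; simp

theorem pyRange_one_succ_map (count : Int) (f : Int → (Int × Int)) :
    (PySem.List.pyRange 1 (count + 1) 1).map f
      = (List.range count.toNat).map (fun k : Nat => f (1 + (k : Int))) := by
  rw [PySem.List.pyRange_one, List.map_map]
  norm_num

-- ===== VERDICT (by name: the statement is the Claim_ definition above) =====
theorem add_coords_spec : Claim_equal_add_coords := by
  intro path direction count _ hpre
  unfold Spec_add_coords add_coords add_coords_alt
  rw [foldl_const_iterate, add_coords_len]
  by_cases hc : 0 < count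
  · simp only [if_pos hc]
    have hne : path ≠ [] := by
      rcases hpre with h | h
      · exact h
      · omega
    obtain ⟨xy, hxy⟩ : ∃ xy, PySem.List.pyGet? path (-1) = some xy := by
      rw [PySem.List.pyGet?_neg_one]
      cases hl : path.getLast? with
      | none => exact absurd (List.getLast?_eq_none_iff.mp hl) hne
      | some v => exact ⟨v, rfl⟩
    obtain ⟨x, y⟩ := xy
    rw [hxy]
    by_cases hR : direction = "R"
    · subst hR
      rw [show PySem.Dict.get? add_coords_delta "R" = some ((1 : Int), (0 : Int)) from by decide]
      dsimp only
      rw [step_iterate "R" 1 0 (fun q a b hq => by unfold add_coords_step; rw [hq]; simp) count.toNat path x y hxy]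
      rw [pyRange_one_succ_map]
      refine congrArg _ (List.map_congr_left fun k _ => ?_)
      rw [Prod.mk.injEq]; constructor <;> ring
    · by_cases hL : direction = "L"
      · subst hL
        rw [show PySem.Dict.get? add_coords_delta "L" = some ((-1 : Int), (0 : Int)) from by decide]
        dsimp only
        rw [step_iterate "L" (-1) 0 (fun q a b hq => by unfold add_coords_step; rw [hq]; simp [sub_eq_add_neg]) count.toNat path x y hxy]
        rw [pyRange_one_succ_map]
        refine congrArg _ (List.map_congr_left fun k _ => ?_)
        rw [Prod.mk.injEq]; constructor <;> ring
      · by_cases hU : direction = "U"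
        · subst hU
          rw [show PySem.Dict.get? add_coords_delta "U" = some ((0 : Int), (1 : Int)) from by decide]
          dsimp only
          rw [step_iterate "U" 0 1 (fun q a b hq => by unfold add_coords_step; rw [hq]; simp) count.toNat path x y hxy]
          rw [pyRange_one_succ_map]
          refine congrArg _ (List.map_congr_left fun k _ => ?_)
          rw [Prod.mk.injEq]; constructor <;> ring
        · by_cases hD : direction = "D"
          · subst hD
            rw [show PySem.Dict.get? add_coords_delta "D" = some ((0 : Int), (-1 : Int)) from by decide]
            dsimp only
            rw [step_iterate "D" 0 (-1) (fun q a b hq => by unfold add_coords_step; rw [hq]; simp [sub_eq_add_neg]) count.toNat path x y hxy]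
            rw [pyRange_one_succ_map]
            refine congrArg _ (List.map_congr_left fun k _ => ?_)
            rw [Prod.mk.injEq]; constructor <;> ring
          · have hbf : ∀ k : String, ¬ direction = k → (k == direction) = false :=
              fun k hk => beq_eq_false_iff_ne.mpr (fun h => hk h.symm)
            have hnone : PySem.Dict.get? add_coords_delta direction = none := by
              have hmk : add_coords_delta
                  = PySem.Dict.mk [("R", ((1 : Int), (0 : Int))), ("L", (-1, 0)), ("U", (0, 1)), ("D", (0, -1))] := by decide
              rw [hmk]
              simp [hbf _ hR, hbf _ hL, hbf _ hU, hbf _ hD, PySem.Dict.get?]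
            rw [hnone]
            have hid : ∀ q, add_coords_step direction q = q := by
              intro q
              unfold add_coords_step
              cases PySem.List.pyGet? q (-1) <;> simp [hR, hL, hU, hD]
            exact Function.iterate_fixed (hid path) count.toNat
  · simp only [if_neg hc]
    have h0 : count.toNat = 0 := by omega
    rw [h0]
    rfl
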